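-- pv_equiv track=rewrite | github.com/t3tra-dev/edgekit | src/edgekit/builder/emitter/transform.py | _compact_python_source_text
-- ===== SOURCE A (Python) =====
-- def _compact_python_source_text(source: str) -> str:
--     compacted_lines: list[str] = []
--     blank_run = 0
--
--     for raw_line in source.splitlines(keepends=True):
--         line = raw_line.rstrip()
--         if not line:
--             blank_run += 1
--             if blank_run > 1:
--                 continue
--             compacted_lines.append("\n")
--             continue
--
--         blank_run = 0
--         compacted_lines.append(f"{line}\n")
--
--     while compacted_lines and compacted_lines[0] == "\n":
--         compacted_lines.pop(0)
--
--     if not compacted_lines: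
--         return ""
--
--     if compacted_lines[-1] != "\n" and not compacted_lines[-1].endswith("\n"):
--         compacted_lines[-1] = f"{compacted_lines[-1]}\n"
--
--     return "".join(compacted_lines)
-- ===== SOURCE B (Python) =====
-- def _compact_python_source_text(source: str) -> str:
--     lines = [l.rstrip() for l in source.splitlines()]
--     # stage 1: cut the line list into maximal runs of equal blankness
--     groups = []
--     rest = lines
--     while rest:
--         head_blank = (rest[0] == "")
--         k = 1
--         while k < len(rest) and (rest[k] == "") == head_blank:
--             k += 1
--         groups.append(rest[:k])
--         rest = rest[k:]
--     # stage 2: each blank run contributes a single "", each other run its lines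
--     result = []
--     for g in groups:
--         if g and g[0] == "":
--             result.append("")
--         else:
--             result.extend(g)
--     # stage 3: groups alternate, so at most the first entry can be blank
--     if result and result[0] == "":
--         result.pop(0)
--     if not result:
--         return ""
--     return "\n".join(result) + "\n"
-- ===== Notes on version B (the rewrite author's own statement) =====
-- stated objective: alternative
-- what changed: Replaces A's single streaming pass with a blank-run counter, keepends fragments, a leading-pop while loop and a dead trailing-newline patch by a staged run-length-grouping algorithm: cut the rstripped lines into maximal runs of equal blankness, emit one empty line per blank run and each non-blank run verbatim, pop the at-most-one leading blank entry, then join once.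
import Mathlib
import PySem

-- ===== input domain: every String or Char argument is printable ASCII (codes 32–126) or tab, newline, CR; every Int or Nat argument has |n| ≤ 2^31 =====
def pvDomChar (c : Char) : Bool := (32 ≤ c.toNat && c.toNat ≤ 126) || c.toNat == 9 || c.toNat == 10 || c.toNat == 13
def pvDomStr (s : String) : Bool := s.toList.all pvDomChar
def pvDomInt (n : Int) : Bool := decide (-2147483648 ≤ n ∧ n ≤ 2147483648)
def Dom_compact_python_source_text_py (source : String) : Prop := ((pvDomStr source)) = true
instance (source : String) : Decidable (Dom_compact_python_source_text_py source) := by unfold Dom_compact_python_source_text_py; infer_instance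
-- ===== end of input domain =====

-- B replaces A's streaming pass (blank-run counter, "\n"-suffixed fragments, pop loop, dead
-- trailing-newline patch) by a staged run-length-grouping algorithm: group lines into maximal
-- runs of equal blankness, emit one "" per blank run, pop the at-most-one leading blank, join.


-- ===== PORT A =====
-- hand port of str.splitlines(keepends=True): exact for the line breaks '\n', '\r', '\r\n',
-- which are the only line breaks a string inside Dom can contain
def pvSplitKeepGo : List Char → List Char → List (List Char) → List (List Char)
  | [], cur, acc => if cur.isEmpty then acc.reverse else (cur.reverse :: acc).reverse
  | '\r' :: '\n' :: rest, cur, acc => pvSplitKeepGo rest [] ((cur.reverse ++ ['\r', '\n']) :: acc)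
  | c :: rest, cur, acc =>
      if c = '\n' ∨ c = '\r' then pvSplitKeepGo rest [] ((cur.reverse ++ [c]) :: acc)
      else pvSplitKeepGo rest (c :: cur) acc

-- the 'while compacted_lines and compacted_lines[0] == "\n": compacted_lines.pop(0)' loop
def pvPopBlanks : List (List Char) → List (List Char)
  | [] => []
  | l :: ls => if l = ['\n'] then pvPopBlanks ls else l :: ls

def compact_python_source_text_py (source : String) : String :=
  let p := (pvSplitKeepGo source.toList [] []).foldl
    (fun (st : List (List Char) × Int) raw_line =>
      let line := PySem.Chars.rstrip raw_line
      if line.isEmpty then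
        let br := st.2 + 1
        if br > 1 then (st.1, br) else (st.1 ++ [['\n']], br)
      else (st.1 ++ [line ++ ['\n']], 0)) ([], 0)
  let cl := pvPopBlanks p.1
  match cl with
  | [] => ""
  | _ :: _ =>
    let last := cl.getLastD []
    let cl2 := if last ≠ ['\n'] ∧ PySem.Chars.endswith last ['\n'] = false
               then cl.dropLast ++ [last ++ ['\n']] else cl
    String.mk cl2.flatten

-- ===== PORT B =====
-- the outer 'while rest:' loop of Source B; the inner 'while k < len(rest) …' index scan that
-- finds the end of the current run of equal blankness is the takeWhile/dropWhile split
def pvGroupsGo : List (List Char) → List (List (List Char))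
  | [] => []
  | l :: ls =>
    (l :: ls.takeWhile (fun x => x.isEmpty == l.isEmpty)) ::
      pvGroupsGo (ls.dropWhile (fun x => x.isEmpty == l.isEmpty))
  termination_by L => L.length
  decreasing_by simpa using Nat.lt_succ_of_le (List.length_dropWhile_le _ _)

def compact_python_source_text_py_alt (source : String) : String :=
  let lines := (PySem.Chars.splitlines source.toList).map PySem.Chars.rstrip
  let groups := pvGroupsGo lines
  let result := groups.foldl
    (fun res g => if (match g with | [] => false | x :: _ => x.isEmpty) then res ++ [[]] else res ++ g)
    []
  let result2 := match result with
    | [] :: t => t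
    | r => r
  match result2 with
  | [] => ""
  | _ :: _ => String.mk (PySem.Chars.join ['\n'] result2 ++ ['\n'])

-- ===== PRECONDITION & SPEC =====
def Spec_compact_python_source_text_py (source : String) (out : String) : Prop := out = compact_python_source_text_py_alt source
instance (source : String) (out : String) : Decidable (Spec_compact_python_source_text_py source out) := by unfold Spec_compact_python_source_text_py; infer_instance

-- ===== CLAIM (what is proved, stated in full; the proofs are below) =====
def Claim_equal_compact_python_source_text_py : Prop := ∀ (source : String), Dom_compact_python_source_text_py source → Spec_compact_python_source_text_py source (compact_python_source_text_py source)

-- ===== LEMMAS AND PROOFS =====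

-- the break predicate of PySem.Chars.splitlines
def pvIsB (c : Char) : Bool :=
  have n := c.toNat
  decide (n = 10) || decide (n = 13) || decide (n = 11) || decide (n = 12) || decide (n = 28) || decide (n = 29) ||
          decide (n = 30) ||
        decide (n = 133) ||
      decide (n = 8232) ||
    decide (n = 8233)

theorem pv_splitlines_eq_go (s : List Char) :
    PySem.Chars.splitlines s = PySem.Chars.splitlines.go pvIsB s [] [] := rfl

theorem pv_toNat_eq (c d : Char) : c = d ↔ c.toNat = d.toNat :=
  ⟨congrArg _, fun h => by apply Char.ext; unfold Char.toNat at h; exact UInt32.toNat_inj.mp h⟩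

theorem pv_isB_dom (c : Char) (h : pvDomChar c = true) :
    pvIsB c = decide (c = '\n' ∨ c = '\r') := by
  have hd : 32 ≤ c.toNat ∧ c.toNat ≤ 126 ∨ c.toNat = 9 ∨ c.toNat = 10 ∨ c.toNat = 13 := by
    have := h; simp [pvDomChar] at this; omega
  simp only [pvIsB, pv_toNat_eq c '\n', pv_toNat_eq c '\r']
  have h11 : ¬ c.toNat = 11 := by omega
  have h12 : ¬ c.toNat = 12 := by omega
  have h28 : ¬ c.toNat = 28 := by omega
  have h29 : ¬ c.toNat = 29 := by omega
  have h30 : ¬ c.toNat = 30 := by omega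
  have h133 : ¬ c.toNat = 133 := by omega
  have h8232 : ¬ c.toNat = 8232 := by omega
  have h8233 : ¬ c.toNat = 8233 := by omega
  have t10 : ('\n').toNat = 10 := by decide
  have t13 : ('\r').toNat = 13 := by decide
  rw [t10, t13]
  simp [h11, h12, h28, h29, h30, h133, h8232, h8233]

theorem pv_rstrip_append_break (l : List Char) (c : Char) (hc : PySem.Chars.isspace c = true) :
    PySem.Chars.rstrip (l ++ [c]) = PySem.Chars.rstrip l := by
  simp [PySem.Chars.rstrip, hc]

theorem pv_splitKeep_rstrip (cs : List Char) (cur : List Char) (accA : List (List Char))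
    (hdom : cs.all pvDomChar = true) :
    ∀ accB : List (List Char), accA.map PySem.Chars.rstrip = accB.map PySem.Chars.rstrip →
    (pvSplitKeepGo cs cur accA).map PySem.Chars.rstrip
      = (PySem.Chars.splitlines.go pvIsB cs cur accB).map PySem.Chars.rstrip := by
  revert hdom
  fun_induction pvSplitKeepGo cs cur accA
  case case1 cur accA h =>
    intro _ accB hacc
    rw [PySem.Chars.splitlines.go]
    simp [h, List.map_reverse, hacc]
  case case2 cur accA h =>
    intro _ accB hacc
    rw [PySem.Chars.splitlines.go]
    simp [h, List.map_reverse, hacc]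
  case case3 rest cur accA ih =>
    intro hdom accB hacc
    rw [PySem.Chars.splitlines.go]
    have hrest : rest.all pvDomChar = true := by simp [List.all_eq_true] at hdom ⊢; tauto
    apply ih hrest
    simp only [List.map_cons, hacc]
    congr 1
    rw [show cur.reverse ++ ['\x0d', '\n'] = (cur.reverse ++ ['\x0d']) ++ ['\n'] by simp]
    rw [pv_rstrip_append_break _ '\n' (by decide), pv_rstrip_append_break _ '\x0d' (by decide)]
  case case4 c rest cur accA hx h ih =>
    intro hdom accB hacc
    have hc : pvDomChar c = true ∧ rest.all pvDomChar = true := by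
      simp [List.all_eq_true] at hdom ⊢; tauto
    rw [PySem.Chars.splitlines.go]
    · rw [pv_isB_dom c hc.1]
      simp only [h, decide_true, if_true]
      apply ih hc.2
      simp only [List.map_cons, hacc]
      congr 1
      rcases h with h | h <;> subst h <;>
        exact pv_rstrip_append_break _ _ (by decide)
    · intro r h1 h2
      exact hx r h1 h2
  case case5 c rest cur accA hx h ih =>
    intro hdom accB hacc
    have hc : pvDomChar c = true ∧ rest.all pvDomChar = true := by
      simp [List.all_eq_true] at hdom ⊢; tauto
    rw [PySem.Chars.splitlines.go]
    · rw [pv_isB_dom c hc.1]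
      simp only [h, decide_false]
      exact ih hc.2 accB hacc
    · intro r h1 h2
      exact hx r h1 h2

-- A's loop body on the already-rstripped line
def pvStepA (st : List (List Char) × Int) (line : List Char) : List (List Char) × Int :=
  if line.isEmpty then
    if st.2 + 1 > 1 then (st.1, st.2 + 1) else (st.1 ++ [['\n']], st.2 + 1)
  else (st.1 ++ [line ++ ['\n']], 0)

-- the collapsing filter both algorithms boil down to, as a one-pass fold body
def pvStepB (out : List (List Char)) (line : List Char) : List (List Char) :=
  if line ≠ [] ∨ (out ≠ [] ∧ out.getLastD [] ≠ []) then out ++ [line] else out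

def pvInv (cl : List (List Char)) (br : Int) (out : List (List Char)) : Prop :=
  pvPopBlanks cl = out.map (· ++ ['\n'])
  ∧ (br ≤ 0 → out = [] ∨ out.getLastD [] ≠ [])
  ∧ (1 ≤ br → out = [] ∨ out.getLastD [] = [])
  ∧ 0 ≤ br

theorem pvPopBlanks_append_ne (cl : List (List Char)) (x : List Char) (hx : x ≠ ['\n']) :
    pvPopBlanks (cl ++ [x]) = pvPopBlanks cl ++ [x] := by
  induction cl with
  | nil => simp [pvPopBlanks, hx]
  | cons l ls ih => by_cases h : l = ['\n'] <;> simp [pvPopBlanks, h, ih]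

theorem pvPopBlanks_append_of_ne_nil (cl : List (List Char)) (x : List Char)
    (h : pvPopBlanks cl ≠ []) :
    pvPopBlanks (cl ++ [x]) = pvPopBlanks cl ++ [x] := by
  induction cl with
  | nil => simp [pvPopBlanks] at h
  | cons l ls ih =>
    by_cases hl : l = ['\n']
    · simp [pvPopBlanks, hl] at h ⊢; exact ih h
    · simp [pvPopBlanks, hl]

theorem pvPopBlanks_append_blank_of_nil (cl : List (List Char))
    (h : pvPopBlanks cl = []) :
    pvPopBlanks (cl ++ [['\n']]) = [] := by
  induction cl with
  | nil => simp [pvPopBlanks]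
  | cons l ls ih =>
    by_cases hl : l = ['\n']
    · simp [pvPopBlanks, hl] at h ⊢; exact ih h
    · simp [pvPopBlanks, hl] at h

theorem pv_step_inv (cl : List (List Char)) (br : Int) (out : List (List Char))
    (l : List Char) (h : pvInv cl br out) :
    pvInv (pvStepA (cl, br) l).1 (pvStepA (cl, br) l).2 (pvStepB out l) := by
  obtain ⟨h1, h2, h3, h4⟩ := h
  by_cases hl : l = []
  · subst hl
    by_cases hbr : br ≤ 0
    · have hA : pvStepA (cl, br) [] = (cl ++ [['\n']], br + 1) := by
        simp only [pvStepA]; simp; omega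
      rcases h2 hbr with hout | hlast
      · subst hout
        have hB : pvStepB [] [] = [] := by simp [pvStepB]
        rw [hA, hB]
        refine ⟨?_, fun _ => Or.inl rfl, fun _ => Or.inl rfl, by omega⟩
        simpa using pvPopBlanks_append_blank_of_nil cl (by simpa using h1)
      · by_cases hout : out = []
        · subst hout
          have hB : pvStepB [] [] = [] := by simp [pvStepB]
          rw [hA, hB]
          refine ⟨?_, fun _ => Or.inl rfl, fun _ => Or.inl rfl, by omega⟩
          simpa using pvPopBlanks_append_blank_of_nil cl (by simpa using h1)
        · have hB : pvStepB out [] = out ++ [[]] := by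
            simp only [pvStepB]
            rw [if_pos (Or.inr ⟨hout, hlast⟩)]
          rw [hA, hB]
          refine ⟨?_, fun h0 => by omega, fun _ => Or.inr (by simp), by omega⟩
          have hne : pvPopBlanks cl ≠ [] := by
            rw [h1]; simpa using hout
          rw [pvPopBlanks_append_of_ne_nil cl _ hne, h1]
          simp
    · have hbr' : 1 ≤ br := by omega
      have hA : pvStepA (cl, br) [] = (cl, br + 1) := by
        simp only [pvStepA]; simp; omega
      have hB : pvStepB out [] = out := by
        simp only [pvStepB]
        rcases h3 hbr' with hout | hlast
        · subst hout; simp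
        · have hc : ¬ (([] : List Char) ≠ [] ∨ (out ≠ [] ∧ out.getLastD [] ≠ [])) := by
            rintro (hcc | ⟨-, hcc⟩)
            · exact hcc rfl
            · exact hcc hlast
          rw [if_neg hc]
      rw [hA, hB]
      exact ⟨h1, fun h0 => by omega, fun _ => h3 (by omega), by omega⟩
  · have hA : pvStepA (cl, br) l = (cl ++ [l ++ ['\n']], 0) := by
      simp only [pvStepA]
      rw [if_neg (by simpa using hl)]
    have hB : pvStepB out l = out ++ [l] := by
      simp only [pvStepB]
      rw [if_pos (Or.inl hl)]
    rw [hA, hB]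
    have hxne : l ++ ['\n'] ≠ ['\n'] := by
      intro hc
      have := congrArg List.length hc
      simp at this
      exact hl (by simpa using this)
    refine ⟨?_, fun _ => Or.inr (by simpa using hl), fun h0 => by omega, by omega⟩
    rw [pvPopBlanks_append_ne cl _ hxne, h1]
    simp

theorem pv_fold_inv (L : List (List Char)) (cl : List (List Char)) (br : Int)
    (out : List (List Char)) (h : pvInv cl br out) :
    pvInv (L.foldl pvStepA (cl, br)).1 (L.foldl pvStepA (cl, br)).2 (L.foldl pvStepB out) := by
  induction L generalizing cl br out with
  | nil => exact h
  | cons l t ih =>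
    have := pv_step_inv cl br out l h
    simpa [List.foldl] using ih _ _ _ this

theorem pv_join_flatten (o : List Char) (os : List (List Char)) :
    ((o :: os).map (· ++ ['\n'])).flatten = PySem.Chars.join ['\n'] (o :: os) ++ ['\n'] := by
  induction os generalizing o with
  | nil => simp [PySem.Chars.join_singleton]
  | cons y t ih =>
    have h := ih y
    simp only [List.map_cons, List.flatten_cons] at h ⊢
    rw [PySem.Chars.join_cons_cons, h]
    simp

-- finishing steps of the two ports, and the ports re-expressed through them
def pvFinishA (cl : List (List Char)) : String :=
  match cl with
  | [] => ""
  | _ :: _ =>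
    let last := cl.getLastD []
    let cl2 := if last ≠ ['\n'] ∧ PySem.Chars.endswith last ['\n'] = false
               then cl.dropLast ++ [last ++ ['\n']] else cl
    String.mk cl2.flatten

def pvFinishB (out : List (List Char)) : String :=
  match out with
  | [] => ""
  | _ :: _ => String.mk (PySem.Chars.join ['\n'] out ++ ['\n'])

-- B-side proof helpers: the one-blank-per-group emission, the pop of the leading blank,
-- and the canonical collapsed stream pvRun
def pvEmitG (g : List (List Char)) : List (List Char) :=
  if (match g with | [] => false | x :: _ => x.isEmpty) then [[]] else g

def pvPop1 : List (List Char) → List (List Char)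
  | [] :: t => t
  | r => r

def pvRun : Bool → List (List Char) → List (List Char)
  | _, [] => []
  | b, l :: t => if l ≠ [] then l :: pvRun true t
                 else if b then [] :: pvRun false t else pvRun false t

theorem pv_runA (source : String) :
    compact_python_source_text_py source
      = pvFinishA (pvPopBlanks
          ((pvSplitKeepGo source.toList [] []).foldl
            (fun st raw => pvStepA st (PySem.Chars.rstrip raw)) ([], 0)).1) := rfl

theorem pv_runB (source : String) :
    compact_python_source_text_py_alt source
      = pvFinishB (pvPop1
          ((pvGroupsGo ((PySem.Chars.splitlines source.toList).map PySem.Chars.rstrip)).foldl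
            (fun res g => if (match g with | [] => false | x :: _ => x.isEmpty) then res ++ [[]] else res ++ g)
            [])) := rfl

theorem pv_core (L : List (List Char)) :
    pvFinishA (pvPopBlanks (L.foldl pvStepA ([], 0)).1) = pvFinishB (L.foldl pvStepB []) := by
  obtain ⟨h1, -, -⟩ := pv_fold_inv L [] 0 [] ⟨rfl, fun _ => Or.inl rfl, fun h => by omega, by omega⟩
  cases houtF : L.foldl pvStepB [] with
  | nil =>
    rw [houtF] at h1
    simp only [List.map_nil] at h1
    rw [h1]
    rfl
  | cons o os =>
    rw [houtF] at h1
    rw [h1]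
    have hlast : ((o :: os).map (· ++ ['\n'])).getLastD [] = ((o :: os).getLast (by simp)) ++ ['\n'] := by
      rw [List.getLastD_eq_getLast?, List.getLast?_map, List.getLast?_eq_some_getLast (by simp)]
      simp
    have hend : PySem.Chars.endswith (((o :: os).map (· ++ ['\n'])).getLastD []) ['\n'] = true := by
      rw [hlast]
      exact (PySem.Chars.endswith_iff _ _).mpr (List.suffix_append _ _)
    rw [List.map_cons]
    simp only [pvFinishA, pvFinishB]
    rw [List.map_cons] at hend
    rw [if_neg (by rw [hend]; simp)]
    have hjf := pv_join_flatten o os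
    rw [List.map_cons] at hjf
    rw [hjf]

-- the emission foldl is a flatMap of pvEmitG
theorem pv_fold_emit (gs : List (List (List Char))) (res : List (List Char)) :
    gs.foldl (fun res g => if (match g with | [] => false | x :: _ => x.isEmpty) then res ++ [[]] else res ++ g) res
      = res ++ gs.flatMap pvEmitG := by
  induction gs generalizing res with
  | nil => simp
  | cons g t ih =>
    simp only [List.foldl, List.flatMap_cons, pvEmitG]
    rw [ih]
    rcases g with _ | ⟨x, xs⟩
    · simp
    · by_cases hx : x.isEmpty = true <;> simp [hx]

theorem pvRun_false_true (L : List (List Char)) (h : ∀ x ∈ L.head?, x ≠ []) :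
    pvRun false L = pvRun true L := by
  cases L with
  | nil => rfl
  | cons l t =>
    have hl : l ≠ [] := h l rfl
    simp [pvRun, hl]

theorem pvRun_false_blanks (g rest : List (List Char)) (h : ∀ x ∈ g, x = []) :
    pvRun false (g ++ rest) = pvRun false rest := by
  induction g with
  | nil => rfl
  | cons x t ih =>
    have hx : x = [] := h x (by simp)
    subst hx
    simp only [List.cons_append]
    rw [show pvRun false ([] :: (t ++ rest)) = pvRun false (t ++ rest) from by simp [pvRun]]
    exact ih (fun y hy => h y (List.mem_cons_of_mem _ hy))

theorem pvRun_true_nonblanks (g rest : List (List Char)) (h : ∀ x ∈ g, x ≠ []) :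
    pvRun true (g ++ rest) = g ++ pvRun true rest := by
  induction g with
  | nil => rfl
  | cons x t ih =>
    have hx : x ≠ [] := h x (by simp)
    simp only [List.cons_append, pvRun, hx, ne_eq, not_false_eq_true, if_true]
    rw [ih (fun y hy => h y (by simp [hy]))]

theorem pv_groups_emit (L : List (List Char)) :
    (pvGroupsGo L).flatMap pvEmitG = pvRun true L := by
  fun_induction pvGroupsGo L with
  | case1 => rfl
  | case2 l ls ih =>
    have hsplit := @List.takeWhile_append_dropWhile _ (fun x => x.isEmpty == l.isEmpty) ls
    have hg : ∀ x ∈ ls.takeWhile (fun x => x.isEmpty == l.isEmpty), x.isEmpty = l.isEmpty := by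
      intro x hx
      simpa using List.mem_takeWhile_imp hx
    have hrest : ∀ x ∈ (ls.dropWhile (fun x => x.isEmpty == l.isEmpty)).head?,
        x.isEmpty ≠ l.isEmpty := by
      intro x hx
      have := List.head?_dropWhile_not (fun x => x.isEmpty == l.isEmpty) ls
      rw [Option.mem_def] at hx
      rw [hx] at this
      simpa using this
    set g := ls.takeWhile (fun x => x.isEmpty == l.isEmpty) with hgdef
    set rest := ls.dropWhile (fun x => x.isEmpty == l.isEmpty) with hrdef
    by_cases hl : l = []
    · subst hl
      have hgb : ∀ x ∈ g, x = [] := by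
        intro x hx
        have := hg x hx
        simpa [List.isEmpty_iff] using this
      have hrb : ∀ x ∈ rest.head?, x ≠ [] := by
        intro x hx hxe
        exact hrest x hx (by rw [hxe])
      simp only [List.flatMap_cons, pvEmitG]
      rw [if_pos (by simp)]
      show [[]] ++ (pvGroupsGo rest).flatMap pvEmitG = pvRun true ([] :: ls)
      rw [ih]
      have : pvRun true ([] :: ls) = [] :: pvRun false ls := by simp [pvRun]
      rw [this, ← hsplit, pvRun_false_blanks g rest hgb, pvRun_false_true rest hrb]
      rfl
    · have hgn : ∀ x ∈ g, x ≠ [] := by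
        intro x hx hxe
        have h2 := hg x hx
        rw [hxe] at h2
        exact hl (by simpa [List.isEmpty_iff] using h2.symm)
      simp only [List.flatMap_cons, pvEmitG]
      rw [if_neg (by simpa [List.isEmpty_iff] using hl)]
      rw [ih]
      have h1 : pvRun true (l :: ls) = l :: pvRun true ls := by simp [pvRun, hl]
      rw [h1, ← hsplit, pvRun_true_nonblanks g rest hgn]
      simp

theorem pv_pop1_run (L : List (List Char)) : pvPop1 (pvRun true L) = pvRun false L := by
  cases L with
  | nil => rfl
  | cons l t =>
    by_cases hl : l = []
    · subst hl
      rw [show pvRun true ([] :: t) = [] :: pvRun false t from by simp [pvRun]]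
      rw [show pvRun false ([] :: t) = pvRun false t from by simp [pvRun]]
      rfl
    · rw [show pvRun true (l :: t) = l :: pvRun true t from by simp [pvRun, hl]]
      rw [show pvRun false (l :: t) = l :: pvRun true t from by simp [pvRun, hl]]
      cases l with
      | nil => exact absurd rfl hl
      | cons c cs => rfl

theorem pv_foldB_run (L : List (List Char)) (out : List (List Char)) :
    L.foldl pvStepB out = out ++ pvRun (decide (out ≠ [] ∧ out.getLastD [] ≠ [])) L := by
  induction L generalizing out with
  | nil => simp [pvRun]
  | cons l t ih =>
    simp only [List.foldl]
    rw [ih]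
    by_cases hl : l = []
    · subst hl
      by_cases hc : out ≠ [] ∧ out.getLastD [] ≠ []
      · have hB : pvStepB out [] = out ++ [[]] := by
          simp only [pvStepB]; rw [if_pos (Or.inr hc)]
        rw [hB, show decide (out ≠ [] ∧ out.getLastD [] ≠ []) = true from decide_eq_true hc]
        rw [show decide ((out ++ [([] : List Char)]) ≠ [] ∧ (out ++ [([] : List Char)]).getLastD [] ≠ []) = false from by simp]
        simp [pvRun]
      · have hB : pvStepB out [] = out := by
          simp only [pvStepB]
          rw [if_neg (fun hor => hor.elim (fun hne => hne rfl) hc)]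
        rw [hB, show decide (out ≠ [] ∧ out.getLastD [] ≠ []) = false from by simpa using hc]
        simp [pvRun]
    · have hB : pvStepB out l = out ++ [l] := by
        simp only [pvStepB]; rw [if_pos (Or.inl hl)]
      rw [hB]
      rw [show decide ((out ++ [l]) ≠ [] ∧ (out ++ [l]).getLastD [] ≠ []) = true from by simp [hl]]
      simp [pvRun, hl]

-- ===== VERDICT (by name: the statement is the Claim_ definition above) =====
theorem compact_python_source_text_py_spec : Claim_equal_compact_python_source_text_py := by
  intro source hdom
  unfold Spec_compact_python_source_text_py
  rw [pv_runA, pv_runB,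
    ← List.foldl_map (f := PySem.Chars.rstrip) (g := pvStepA)]
  rw [show (pvSplitKeepGo source.toList [] []).map PySem.Chars.rstrip
      = (PySem.Chars.splitlines source.toList).map PySem.Chars.rstrip from by
    rw [pv_splitlines_eq_go]
    exact pv_splitKeep_rstrip source.toList [] [] (by have := hdom; unfold Dom_compact_python_source_text_py pvDomStr at this; exact this) [] rfl]
  rw [pv_core]
  rw [pv_fold_emit, List.nil_append, pv_groups_emit, pv_pop1_run, pv_foldB_run]
  simp
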